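-- pv_equiv track=rewrite | github.com/MasonLanham/data-structures-and-algorithms | TwoPointers/AllPairsGreaterThanTarget.py | pairsOverValue
-- ===== SOURCE A (Python) =====
-- import heapq, math
--
-- def pairsOverValue(arr, target):
--
--     #heap sorting
--     heap = []
--     for i in range(len(arr)):
--         heapq.heappush(heap, arr[i])
--
--     sort = []
--     for i in range(len(arr)):
--         sort.append(heapq.heappop(heap))
--
--     high = len(sort) - 1
--     low = 0
--     totalPairs = 0
--     while(low < high):
--         if(sort[low] + sort[high] > target):
--             totalPairs += high - low
--             high -= 1
--         else:
--             low += 1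
--     return totalPairs
-- ===== SOURCE B (Python) =====
-- def pairsOverValue(arr, target):
--     # Direct pair count: for each element, count later partners summing over
--     # target; no sorting, no heap, no two-pointer scan.
--     total = 0
--     rest = list(arr)
--     while rest:
--         x = rest.pop(0)
--         for y in rest:
--             if x + y > target:
--                 total += 1
--     return total
-- ===== Notes on version B (the rewrite author's own statement) =====
-- stated objective: simpler
-- what changed: Replaces the heap-sort plus two-pointer window scan with a direct one-pass-per-element count of pairs i<j with arr[i]+arr[j] > target, removing the sorting phase entirely.
import Mathlib
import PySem

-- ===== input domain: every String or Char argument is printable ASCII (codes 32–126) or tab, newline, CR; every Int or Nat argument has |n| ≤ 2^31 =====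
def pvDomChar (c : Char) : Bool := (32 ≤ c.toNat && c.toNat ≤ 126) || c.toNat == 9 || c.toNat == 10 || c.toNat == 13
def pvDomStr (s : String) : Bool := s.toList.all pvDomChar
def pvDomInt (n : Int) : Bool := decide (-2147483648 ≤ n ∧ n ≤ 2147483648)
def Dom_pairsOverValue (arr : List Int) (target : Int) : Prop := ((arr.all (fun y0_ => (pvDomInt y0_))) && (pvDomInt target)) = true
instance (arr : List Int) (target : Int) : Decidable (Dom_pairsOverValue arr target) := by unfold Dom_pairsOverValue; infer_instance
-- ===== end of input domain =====

-- B replaces A's heap sort + two-pointer scan by a direct count of pairs i<j with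
-- arr[i]+arr[j] > target (simpler, no sorting); proved to return the same value on all inputs.

-- ===== PORT A =====
-- heapq is a library module; it is ported by its observable priority-queue semantics
-- (the way PySem models dict without hash tables): the heap list is kept sorted,
-- heappush = ordered insert, heappop = remove the first (smallest) element.
-- For Int elements this is exact for every push/pop sequence A performs.
def heappush (heap : List Int) (item : Int) : List Int :=
  match heap with
  | [] => [item]
  | h :: t => if item ≤ h then item :: h :: t else h :: heappush t item

-- while(low < high): … ; sort[i] = PySem.List.pyGetD (always in range while the loop runs)
def tpLoop (sort : List Int) (target low high totalPairs : Int) : Int :=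
  if low < high then
    if PySem.List.pyGetD sort low 0 + PySem.List.pyGetD sort high 0 > target then
      tpLoop sort target low (high - 1) (totalPairs + (high - low))
    else
      tpLoop sort target (low + 1) high totalPairs
  else totalPairs
termination_by (high - low).toNat
decreasing_by all_goals omega

def pairsOverValue (arr : List Int) (target : Int) : Int :=
  -- for i in range(len(arr)): heapq.heappush(heap, arr[i])
  let heap := (PySem.List.pyRange 0 (arr.length : Int) 1).foldl
      (fun heap i => heappush heap (PySem.List.pyGetD arr i 0)) []
  -- for i in range(len(arr)): sort.append(heapq.heappop(heap))
  -- (the [] branch is unreachable: the heap holds len(arr) elements)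
  let hs := (PySem.List.pyRange 0 (arr.length : Int) 1).foldl
      (fun hs _ => match hs.1 with
        | [] => hs
        | h :: t => (t, hs.2 ++ [h])) (heap, ([] : List Int))
  let sort := hs.2
  tpLoop sort target 0 ((sort.length : Int) - 1) 0

-- ===== PORT B =====
-- while rest: x = rest.pop(0); for y in rest: if x + y > target: total += 1
def altLoop (rest : List Int) (target : Int) (total : Int) : Int :=
  match rest with
  | [] => total
  | x :: rest' =>
      altLoop rest' target
        (rest'.foldl (fun tot y => if x + y > target then tot + 1 else tot) total)

def pairsOverValue_alt (arr : List Int) (target : Int) : Int :=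
  altLoop arr target 0

-- ===== PRECONDITION & SPEC =====
def Spec_pairsOverValue (arr : List Int) (target : Int) (out : Int) : Prop := out = pairsOverValue_alt arr target
instance (arr : List Int) (target : Int) (out : Int) : Decidable (Spec_pairsOverValue arr target out) := by unfold Spec_pairsOverValue; infer_instance

-- ===== CLAIM (what is proved, stated in full; the proofs are below) =====
def Claim_equal_pairsOverValue : Prop := ∀ (arr : List Int) (target : Int), Dom_pairsOverValue arr target → Spec_pairsOverValue arr target (pairsOverValue arr target)

-- ===== LEMMAS AND PROOFS =====

-- the pure pair count B computes: for each head, count later partners over target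
def brute (t : Int) : List Int → Int
  | [] => 0
  | x :: r => ((r.countP (fun y => decide (x + y > t)) : Nat) : Int) + brute t r

-- the window sort[low..high] as a list
def pvSeg (s : List Int) (low high : Int) : List Int :=
  (s.take (high + 1).toNat).drop low.toNat

lemma foldl_count (x t : Int) (l : List Int) (c : Int) :
    l.foldl (fun tot y => if x + y > t then tot + 1 else tot) c
      = c + ((l.countP (fun y => decide (x + y > t)) : Nat) : Int) := by
  induction l generalizing c with
  | nil => simp
  | cons y r ih =>
      simp only [List.foldl_cons, List.countP_cons, ih]
      by_cases h : x + y > t <;> simp [h] <;> push_cast <;> ring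

lemma altLoop_eq (l : List Int) (t total : Int) :
    altLoop l t total = total + brute t l := by
  induction l generalizing total with
  | nil => simp [altLoop, brute]
  | cons x r ih => simp [altLoop, brute, foldl_count, ih]; ring

lemma brute_perm {l l' : List Int} (t : Int) (h : l.Perm l') : brute t l = brute t l' := by
  induction h with
  | nil => rfl
  | cons x h ih => simp [brute, h.countP_eq, ih]
  | swap x y l =>
      simp only [brute, List.countP_cons]
      have : (decide (y + x > t)) = (decide (x + y > t)) := by rw [Int.add_comm]
      rw [this]
      by_cases h : x + y > t <;> simp [h] <;> push_cast <;> ring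
  | trans h1 h2 ih1 ih2 => rw [ih1, ih2]

lemma brute_append (t z : Int) (l : List Int) :
    brute t (l ++ [z]) = brute t l + ((l.countP (fun x => decide (x + z > t)) : Nat) : Int) := by
  induction l with
  | nil => simp [brute]
  | cons x r ih =>
      simp only [List.cons_append, brute, ih, List.countP_append, List.countP_cons]
      simp [List.countP]
      push_cast
      ring

lemma brute_short (t : Int) (l : List Int) (h : l.length ≤ 1) : brute t l = 0 := by
  match l, h with
  | [], _ => rfl
  | [x], _ => simp [brute]

lemma heappush_perm (heap : List Int) (x : Int) : (heappush heap x).Perm (x :: heap) := by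
  induction heap with
  | nil => simp [heappush]
  | cons h t ih =>
      simp only [heappush]
      split
      · exact List.Perm.refl _
      · exact (ih.cons h).trans (List.Perm.swap x h t)

lemma heappush_sorted (heap : List Int) (x : Int) (hs : heap.Pairwise (· ≤ ·)) :
    (heappush heap x).Pairwise (· ≤ ·) := by
  induction heap with
  | nil => simp [heappush]
  | cons h t ih =>
      rw [List.pairwise_cons] at hs
      simp only [heappush]
      split
      · rename_i hx
        rw [List.pairwise_cons]
        refine ⟨?_, List.pairwise_cons.2 hs⟩
        intro b hb
        rcases List.mem_cons.1 hb with rfl | hb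
        · exact hx
        · exact le_trans hx (hs.1 b hb)
      · rename_i hx
        rw [List.pairwise_cons]
        refine ⟨?_, ih hs.2⟩
        intro b hb
        have := (heappush_perm t x).mem_iff.1 hb
        rcases List.mem_cons.1 this with rfl | hb'
        · omega
        · exact hs.1 b hb'

lemma foldl_heappush_perm (l : List Int) (heap : List Int) :
    (l.foldl heappush heap).Perm (heap ++ l) := by
  induction l generalizing heap with
  | nil => simp
  | cons x r ih =>
      simp only [List.foldl_cons]
      refine (ih (heappush heap x)).trans ?_
      have h1 : (heappush heap x ++ r).Perm ((x :: heap) ++ r) :=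
        (heappush_perm heap x).append_right r
      refine h1.trans ?_
      simp only [List.cons_append]
      exact (List.perm_middle).symm

lemma foldl_heappush_sorted (l : List Int) (heap : List Int) (hs : heap.Pairwise (· ≤ ·)) :
    (l.foldl heappush heap).Pairwise (· ≤ ·) := by
  induction l generalizing heap with
  | nil => exact hs
  | cons x r ih => exact ih _ (heappush_sorted heap x hs)

-- the pop loop empties the heap in order: result.2 = sort ++ heap
lemma popLoop_eq (idxs : List Int) (heap sort : List Int) (h : heap.length ≤ idxs.length) :
    (idxs.foldl (fun hs _ => match hs.1 with
        | [] => hs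
        | h :: t => (t, hs.2 ++ [h])) (heap, sort)).2 = sort ++ heap := by
  induction idxs generalizing heap sort with
  | nil =>
      have : heap = [] := List.length_eq_zero_iff.1 (Nat.le_zero.1 h)
      simp [this]
  | cons i r ih =>
      cases heap with
      | nil => simpa using ih [] sort (by simp)
      | cons x t =>
          simp only [List.foldl_cons]
          have := ih t (sort ++ [x]) (by simpa using Nat.le_of_succ_le_succ (by simpa using h))
          simpa [List.append_assoc] using this

-- window decompositions
lemma pvSeg_snoc (s : List Int) (low high : Int) (h0 : 0 ≤ low) (hlh : low < high)
    (hh : high < (s.length : Int)) :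
    pvSeg s low high = pvSeg s low (high - 1) ++ [s[high.toNat]'(by omega)] := by
  unfold pvSeg
  have h1 : (high + 1).toNat = high.toNat + 1 := by omega
  have h2 : (high - 1 + 1).toNat = high.toNat := by omega
  rw [h1, h2]
  rw [List.take_succ]
  have hget : s[high.toNat]? = some (s[high.toNat]'(by omega)) := by
    rw [List.getElem?_eq_getElem]
  rw [hget]
  rw [List.drop_append_of_le_length]
  · simp
  · simp [List.length_take]; omega

lemma pvSeg_cons (s : List Int) (low high : Int) (h0 : 0 ≤ low) (hlh : low < high)
    (hh : high < (s.length : Int)) :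
    pvSeg s low high = s[low.toNat]'(by omega) :: pvSeg s (low + 1) high := by
  unfold pvSeg
  have h1 : (low + 1).toNat = low.toNat + 1 := by omega
  rw [h1]
  rw [List.drop_eq_getElem_cons (by simp [List.length_take]; omega)]
  congr 1
  rw [List.getElem_take]

lemma mem_pvSeg (s : List Int) (low high : Int) {x : Int} (hx : x ∈ pvSeg s low high)
    (h0 : 0 ≤ low) :
    ∃ i : Nat, low.toNat ≤ i ∧ (i : Int) ≤ high ∧ ∃ (h : i < s.length), x = s[i] := by
  unfold pvSeg at hx
  obtain ⟨i, hi, hxi⟩ := List.mem_iff_getElem.1 hx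
  rw [List.getElem_drop, List.getElem_take] at hxi
  refine ⟨low.toNat + i, by omega, ?_, ?_, hxi.symm⟩
  · have : low.toNat + i < (high + 1).toNat := by
      have := hi
      simp [List.length_drop, List.length_take] at this
      omega
    omega
  · have := hi
    simp [List.length_drop, List.length_take] at this
    omega

lemma sorted_getElem_le (s : List Int) (hs : s.Pairwise (· ≤ ·)) (i j : Nat)
    (hij : i ≤ j) (hj : j < s.length) : s[i]'(by omega) ≤ s[j] := by
  rcases Nat.lt_or_ge i j with h | h
  · exact List.pairwise_iff_getElem.1 hs i j (by omega) hj h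
  · have : i = j := by omega
    subst this; rfl

lemma tpLoop_eq (s : List Int) (t : Int) (hs : s.Pairwise (· ≤ ·)) :
    ∀ (n : Nat) (low high total : Int), (high - low).toNat ≤ n → 0 ≤ low →
      high < (s.length : Int) →
      tpLoop s t low high total = total + brute t (pvSeg s low high) := by
  intro n
  induction n with
  | zero =>
      intro low high total hn h0 hh
      have hle : ¬ low < high := by omega
      rw [tpLoop, if_neg hle]
      rw [brute_short t _ (by unfold pvSeg; simp [List.length_drop, List.length_take]; omega)]
      ring
  | succ n ih =>
      intro low high total hn h0 hh
      by_cases hlh : low < high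
      · have hgl : PySem.List.pyGetD s low 0 = s[low.toNat]'(by omega) :=
          PySem.List.pyGetD_eq_getElem s (i := low) 0 h0 (by omega)
        have hgh : PySem.List.pyGetD s high 0 = s[high.toNat]'(by omega) :=
          PySem.List.pyGetD_eq_getElem s (i := high) 0 (by omega) hh
        rw [tpLoop, if_pos hlh, hgl, hgh]
        by_cases hc : s[low.toNat]'(by omega) + s[high.toNat]'(by omega) > t
        · rw [if_pos hc]
          rw [ih low (high - 1) (total + (high - low)) (by omega) h0 (by omega)]
          rw [pvSeg_snoc s low high h0 hlh hh, brute_append]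
          have hcount : (pvSeg s low (high - 1)).countP
              (fun x => decide (x + s[high.toNat]'(by omega) > t))
              = (pvSeg s low (high - 1)).length := by
            rw [List.countP_eq_length]
            intro x hx
            obtain ⟨i, hi1, hi2, hi3, rfl⟩ := mem_pvSeg s low (high - 1) hx h0
            have hlo : s[low.toNat]'(by omega) ≤ s[i]'(by omega) :=
              sorted_getElem_le s hs low.toNat i hi1 hi3
            simp only [decide_eq_true_eq]
            omega
          have hlen : ((pvSeg s low (high - 1)).length : Int) = high - low := by
            unfold pvSeg
            simp [List.length_drop, List.length_take]
            omega
          rw [hcount, hlen]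
          ring
        · rw [if_neg hc]
          rw [ih (low + 1) high total (by omega) (by omega) hh]
          rw [pvSeg_cons s low high h0 hlh hh]
          have hcount : (pvSeg s (low + 1) high).countP
              (fun y => decide (s[low.toNat]'(by omega) + y > t)) = 0 := by
            rw [List.countP_eq_zero]
            intro y hy
            obtain ⟨i, hi1, hi2, hi3, rfl⟩ := mem_pvSeg s (low + 1) high hy (by omega)
            have hhi : s[i]'(by omega) ≤ s[high.toNat]'(by omega) :=
              sorted_getElem_le s hs i high.toNat (by omega) (by omega)
            simp only [decide_eq_true_eq]
            omega
          simp only [brute, hcount]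
          simp
      · rw [tpLoop, if_neg hlh]
        rw [brute_short t _ (by unfold pvSeg; simp [List.length_drop, List.length_take]; omega)]
        ring

lemma pvSeg_full (s : List Int) : pvSeg s 0 ((s.length : Int) - 1) = s := by
  unfold pvSeg
  have : ((s.length : Int) - 1 + 1).toNat = s.length := by omega
  simp [this]

-- ===== VERDICT (by name: the statement is the Claim_ definition above) =====
theorem pairsOverValue_spec : Claim_equal_pairsOverValue := by
  intro arr target _
  show pairsOverValue arr target = pairsOverValue_alt arr target
  simp only [pairsOverValue]
  rw [PySem.List.foldl_pyRange_zero_pyGetD']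
  set heap := arr.foldl heappush [] with hheap
  have hperm : heap.Perm arr := by simpa using foldl_heappush_perm arr []
  have hsorted : heap.Pairwise (· ≤ ·) := foldl_heappush_sorted arr [] (by simp)
  have hlen : heap.length = arr.length := hperm.length_eq
  have hpop : ((PySem.List.pyRange 0 (arr.length : Int) 1).foldl
      (fun hs _ => match hs.1 with
        | [] => hs
        | h :: t => (t, hs.2 ++ [h])) (heap, ([] : List Int))).2 = heap := by
    have hl : heap.length ≤ (PySem.List.pyRange 0 (arr.length : Int) 1).length := by
      rw [PySem.List.length_pyRange_one]; omega
    simpa using popLoop_eq _ heap [] hl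
  rw [hpop]
  rw [tpLoop_eq heap target hsorted ((heap.length : Int) - 1 - 0).toNat 0
      ((heap.length : Int) - 1) 0 (by omega) (by omega) (by omega)]
  rw [pvSeg_full]
  rw [pairsOverValue_alt, altLoop_eq, brute_perm target hperm]
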